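-- pv_equiv track=rewrite | github.com/HuihuiChyan/BJTUNLP_Practice2019 | chinese_word_segmentation/awfulCWS/evaluate.py | tag2sent
-- ===== SOURCE A (Python) =====
-- def tag2sent(feature,tag,length,vocab):
-- 	#word2idx = {val:key for key,val in vocab}
-- 	sent = feature[:length]
-- 	idx2sent = []
-- 	k = 0
-- 	flag = 0
-- 	for ch in tag:
-- 		if ch == 3:
-- 			idx2sent.append(vocab[feature[k]])
-- 		elif ch == 0:
-- 			flag = 1
-- 			st = k
-- 		elif ch==1 and flag==1:
-- 			temp = ""
-- 			for i in range(st,k+1):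
-- 				temp = temp + vocab[feature[i]]
-- 			idx2sent.append(temp)
-- 			flag = 0
-- 			st = -1
-- 		if flag==1 and(ch==3 or ch==1):
-- 			flag = 0
-- 		k += 1
-- 	return idx2sent
-- ===== SOURCE B (Python) =====
-- def tag2sent(feature, tag, length, vocab):
--     # Stateless decoder: for each terminator tag (3 = single, 1 = span end),
--     # search backwards for its opening 0; no running flag/start state.
--     out = []
--     for e in range(len(tag)):
--         ch = tag[e]
--         if ch == 3:
--             out.append(vocab[feature[e]])
--         elif ch == 1:
--             s = e - 1
--             while s >= 0 and tag[s] not in (0, 1, 3):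
--                 s -= 1
--             if s >= 0 and tag[s] == 0:
--                 out.append("".join(vocab[feature[i]] for i in range(s, e + 1)))
--     return out
-- ===== Notes on version B (the rewrite author's own statement) =====
-- stated objective: simpler
-- what changed: Replaces A's forward flag/start-index state machine with a stateless per-terminator decoder: for each tag 1 it searches backwards for the opening 0 (stopping at any 0/1/3), so no flag, no stored start and no trailing reset logic remain.
import Mathlib
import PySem

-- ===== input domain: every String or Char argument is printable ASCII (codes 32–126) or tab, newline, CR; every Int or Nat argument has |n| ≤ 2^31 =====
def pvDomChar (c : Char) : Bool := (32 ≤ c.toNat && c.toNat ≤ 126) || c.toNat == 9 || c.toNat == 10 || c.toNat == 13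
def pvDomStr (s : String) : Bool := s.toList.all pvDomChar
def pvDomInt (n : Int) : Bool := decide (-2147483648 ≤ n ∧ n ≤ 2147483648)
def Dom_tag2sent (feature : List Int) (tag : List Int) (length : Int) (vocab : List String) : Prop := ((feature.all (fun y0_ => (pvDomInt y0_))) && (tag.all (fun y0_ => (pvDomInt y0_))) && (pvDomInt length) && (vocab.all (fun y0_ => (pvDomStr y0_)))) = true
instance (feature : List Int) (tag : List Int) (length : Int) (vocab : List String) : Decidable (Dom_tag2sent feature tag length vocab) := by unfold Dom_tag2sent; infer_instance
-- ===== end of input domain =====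

-- B replaces A's forward flag/start-index state machine with a stateless per-terminator
-- backward search for the opening 0 (objective: simpler; return value only).

-- ===== PORT A =====
-- vocab[feature[k]] (exact on Pre_, where both indices are in range; outside Pre_ Python raises)
def pvIdx (feature : List Int) (vocab : List String) (k : Int) : String :=
  (((PySem.List.pyGet? feature k).bind (fun i => PySem.List.pyGet? vocab i)).getD "")

-- one iteration of A's for-loop; state = (idx2sent, k, flag, st)
def tag2sentStepA (feature : List Int) (vocab : List String)
    (s : List String × Int × Int × Int) (ch : Int) : List String × Int × Int × Int :=
  match s with
  | (idx2sent, k, flag, st) =>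
    let t :=
      if ch == 3 then (idx2sent ++ [pvIdx feature vocab k], flag, st)
      else if ch == 0 then (idx2sent, (1 : Int), k)
      else if ch == 1 && flag == 1 then
        let temp := (PySem.List.pyRange st (k+1) 1).foldl
          (fun t i => t ++ pvIdx feature vocab i) ""
        (idx2sent ++ [temp], (0 : Int), (-1 : Int))
      else (idx2sent, flag, st)
    let flag2 := if t.2.1 == 1 && (ch == 3 || ch == 1) then (0 : Int) else t.2.1
    (t.1, k + 1, flag2, t.2.2)

def tag2sent (feature : List Int) (tag : List Int) (length : Int) (vocab : List String) : List String :=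
  let _sent := PySem.List.slice feature none (some length)  -- sent = feature[:length] (unused by A)
  (tag.foldl (tag2sentStepA feature vocab) ([], 0, 0, 0)).1

-- ===== PORT B =====
-- the while loop 's = e-1; while s >= 0 and tag[s] not in (0,1,3): s -= 1': scanning downwards
-- from e-1, returns the first index whose tag is 0/1/3 (none = fell below 0); every index probed
-- is < tag.length, so getD is exact there
def pvBack (tag : List Int) : Nat → Option Nat
  | 0 => none
  | s + 1 =>
    if tag.getD s 0 == 0 || tag.getD s 0 == 1 || tag.getD s 0 == 3 then some s
    else pvBack tag s

-- one iteration of B's for-loop over e in range(len(tag))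
def tag2sentStepB (feature : List Int) (tag : List Int) (vocab : List String)
    (out : List String) (e : Nat) : List String :=
  let ch := tag.getD e 0
  if ch == 3 then out ++ [pvIdx feature vocab (e : Int)]
  else if ch == 1 then
    match pvBack tag e with
    | some s =>
      if tag.getD s 0 == 0 then
        out ++ [PySem.Str.join ""
          ((PySem.List.pyRange (s : Int) ((e : Int) + 1) 1).map (pvIdx feature vocab))]
      else out
    | none => out
  else out

def tag2sent_alt (feature : List Int) (tag : List Int) (length : Int) (vocab : List String) : List String :=
  (List.range tag.length).foldl (tag2sentStepB feature tag vocab) []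

-- ===== PRECONDITION & SPEC =====
-- Pre_ admits exactly the inputs on which the Python A returns: every position tagged 3, and every
-- position inside a completed span (a 0 at s, a 1 at e, no 0/1/3 strictly between), must hold a
-- valid (possibly negative, Python-style) vocab index; on all other inputs A raises IndexError.
def Pre_tag2sent (feature : List Int) (tag : List Int) (length : Int) (vocab : List String) : Prop :=
  ∀ i ∈ List.range tag.length,
    (tag.getD i 2 = 3 ∨
      ∃ s ∈ List.range (i + 1), ∃ e ∈ List.range tag.length,
        i ≤ e ∧ tag.getD s 2 = 0 ∧ tag.getD e 2 = 1 ∧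
        ∀ j ∈ List.range e, s < j → (tag.getD j 2 ≠ 0 ∧ tag.getD j 2 ≠ 1 ∧ tag.getD j 2 ≠ 3)) →
    ((i : Int) < feature.length ∧ PySem.Raise.InRange vocab.length (feature.getD i 0))
instance (feature : List Int) (tag : List Int) (length : Int) (vocab : List String) : Decidable (Pre_tag2sent feature tag length vocab) := by unfold Pre_tag2sent; infer_instance

def pvWitness_tag2sent : List Int × List Int × Int × List String := ([0, 1, 0], [0, 1, 3], 3, ["a", "b"])

def Spec_tag2sent (feature : List Int) (tag : List Int) (length : Int) (vocab : List String) (out : List String) : Prop := out = tag2sent_alt feature tag length vocab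
instance (feature : List Int) (tag : List Int) (length : Int) (vocab : List String) (out : List String) : Decidable (Spec_tag2sent feature tag length vocab out) := by unfold Spec_tag2sent; infer_instance

-- ===== CLAIM (what is proved, stated in full; the proofs are below) =====
def Claim_equal_tag2sent : Prop := ∀ (feature : List Int) (tag : List Int) (length : Int) (vocab : List String), Dom_tag2sent feature tag length vocab → Pre_tag2sent feature tag length vocab → Spec_tag2sent feature tag length vocab (tag2sent feature tag length vocab)

-- ===== LEMMAS AND PROOFS =====

-- relation between A's (flag, st) after k steps and B's backward search from k
def pvInv (tag : List Int) (k : Nat) (flag st : Int) : Prop :=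
  (flag = 1 ∧ ∃ s : Nat, st = (s : Int) ∧ pvBack tag k = some s ∧ tag.getD s 0 = 0) ∨
  (flag ≠ 1 ∧ ∀ s : Nat, pvBack tag k = some s → tag.getD s 0 ≠ 0)

-- left fold of ++ starting from s is s ++ the empty-separator join
theorem pvFoldJoin (v : Int → String) : ∀ (l : List Int) (s : String),
    l.foldl (fun t i => t ++ v i) s = s ++ PySem.Str.join "" (l.map v) := by
  intro l
  induction l with
  | nil =>
    intro s
    simp [PySem.Str.join, PySem.Chars.join, List.intercalate]
  | cons a l ih =>
    intro s
    simp only [List.foldl_cons, List.map_cons, ih]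
    have h : PySem.Str.join "" (v a :: l.map v) = v a ++ PySem.Str.join "" (l.map v) := by
      apply String.toList_injective
      cases l with
      | nil => simp [PySem.Str.join, PySem.Chars.join, List.intercalate]
      | cons b t =>
        simp [PySem.Str.join, PySem.Chars.join, List.intercalate, String.toList_append]
    rw [h, String.append_assoc]

theorem pvFoldJoin₀ (v : Int → String) (l : List Int) :
    l.foldl (fun t i => t ++ v i) "" = PySem.Str.join "" (l.map v) := by
  rw [pvFoldJoin]
  apply String.toList_injective
  simp

-- main loop invariant: A's fold over the suffix of tag from position k equals B's fold
-- over the remaining indices, whenever pvInv relates A's state to the backward searches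
theorem tag2sent_loop (feature : List Int) (vocab : List String) (tag : List Int) :
    ∀ (rest : List Int) (k : Nat) (acc : List String) (flag st : Int),
    rest = tag.drop k →
    pvInv tag k flag st →
    (rest.foldl (tag2sentStepA feature vocab) (acc, (k : Int), flag, st)).1
      = (List.range' k rest.length).foldl (tag2sentStepB feature tag vocab) acc := by
  intro rest
  induction rest with
  | nil => intro k acc flag st _ _; rfl
  | cons ch rest' ih =>
    intro k acc flag st hdrop hinv
    have hk : k < tag.length := by
      by_contra h
      rw [List.drop_eq_nil_of_le (by omega)] at hdrop
      exact List.cons_ne_nil _ _ hdrop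
    rw [List.drop_eq_getElem_cons hk] at hdrop
    injection hdrop with hchk hrest'
    have hget : tag[k]?.getD 0 = ch := by
      simp [List.getElem?_eq_getElem hk, hchk.symm]
    have hgetD : tag.getD k 0 = ch := by
      rw [List.getD_eq_getElem?_getD]; exact hget
    have hback : pvBack tag (k + 1)
        = if tag.getD k 0 == 0 || tag.getD k 0 == 1 || tag.getD k 0 == 3 then some k
          else pvBack tag k := rfl
    have hcast : ((k : Int) + 1) = ((k + 1 : Nat) : Int) := by push_cast; ring
    simp only [List.length_cons, List.range'_succ, List.foldl_cons]
    by_cases h3 : ch = 3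
    · -- single-character word; any pending span is abandoned
      subst h3
      have hafter : ∀ s : Nat, pvBack tag (k + 1) = some s → tag.getD s 0 ≠ 0 := by
        intro s hs
        rw [hback, hgetD] at hs
        simp at hs
        rw [← hs, hgetD]
        norm_num
      have hB : tag2sentStepB feature tag vocab acc k
          = acc ++ [pvIdx feature vocab (k : Int)] := by
        simp [tag2sentStepB, hget]
      rcases hinv with ⟨hf, _⟩ | ⟨hf, _⟩
      · subst hf
        have hA : tag2sentStepA feature vocab (acc, (k : Int), 1, st) 3
            = (acc ++ [pvIdx feature vocab (k : Int)], (k : Int) + 1, 0, st) := by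
          simp [tag2sentStepA]
        rw [hA, hB, hcast]
        exact ih (k + 1) _ 0 st hrest' (Or.inr ⟨by norm_num, hafter⟩)
      · have hA : tag2sentStepA feature vocab (acc, (k : Int), flag, st) 3
            = (acc ++ [pvIdx feature vocab (k : Int)], (k : Int) + 1, flag, st) := by
          simp [tag2sentStepA, hf]
        rw [hA, hB, hcast]
        exact ih (k + 1) _ flag st hrest' (Or.inr ⟨hf, hafter⟩)
    · by_cases h0 : ch = 0
      · -- (re)open a span at k
        subst h0
        have hA : tag2sentStepA feature vocab (acc, (k : Int), flag, st) 0
            = (acc, (k : Int) + 1, 1, (k : Int)) := by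
          simp [tag2sentStepA]
        have hB : tag2sentStepB feature tag vocab acc k = acc := by
          simp [tag2sentStepB, hget]
        rw [hA, hB, hcast]
        refine ih (k + 1) _ 1 (k : Int) hrest' (Or.inl ⟨rfl, k, rfl, ?_, hgetD⟩)
        rw [hback, hgetD]; norm_num
      · by_cases h1 : ch = 1
        · subst h1
          rcases hinv with ⟨hf, s, hst, hbk, hs0⟩ | ⟨hf, hnone⟩
          · -- flag set: emit the span from st to k
            subst hf hst
            have hs0' : tag[s]?.getD 0 = (0 : Int) := by
              rw [← List.getD_eq_getElem?_getD]; exact hs0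
            have hA : tag2sentStepA feature vocab (acc, (k : Int), 1, (s : Int)) 1
                = (acc ++ [(PySem.List.pyRange (s : Int) ((k : Int)+1) 1).foldl
                    (fun t i => t ++ pvIdx feature vocab i) ""], (k : Int) + 1, 0, -1) := by
              simp [tag2sentStepA]
            have hB : tag2sentStepB feature tag vocab acc k
                = acc ++ [PySem.Str.join ""
                    ((PySem.List.pyRange (s : Int) ((k : Int) + 1) 1).map (pvIdx feature vocab))] := by
              simp [tag2sentStepB, hget, hbk, hs0']
            rw [hA, hB, pvFoldJoin₀, hcast]
            refine ih (k + 1) _ 0 (-1) hrest' (Or.inr ⟨by norm_num, ?_⟩)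
            intro u hu
            rw [hback, hgetD] at hu
            simp at hu
            rw [← hu, hgetD]
            norm_num
          · -- no open span: the 1 is ignored
            have hA : tag2sentStepA feature vocab (acc, (k : Int), flag, st) 1
                = (acc, (k : Int) + 1, flag, st) := by
              simp [tag2sentStepA, hf]
            have hB : tag2sentStepB feature tag vocab acc k = acc := by
              cases hbk : pvBack tag k with
              | none => simp [tag2sentStepB, hget, hbk]
              | some s =>
                have hne : tag[s]?.getD 0 ≠ (0 : Int) := by
                  rw [← List.getD_eq_getElem?_getD]; exact hnone s hbk
                simp [tag2sentStepB, hget, hbk, hne]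
            rw [hA, hB, hcast]
            refine ih (k + 1) _ flag st hrest' (Or.inr ⟨hf, ?_⟩)
            intro u hu
            rw [hback, hgetD] at hu
            simp at hu
            rw [← hu, hgetD]
            norm_num
        · -- ordinary middle character: both sides skip it, state unchanged
          have hA : tag2sentStepA feature vocab (acc, (k : Int), flag, st) ch
              = (acc, (k : Int) + 1, flag, st) := by
            rcases hinv with ⟨hf, _⟩ | ⟨hf, _⟩
            · subst hf; simp [tag2sentStepA, h3, h0, h1]
            · simp [tag2sentStepA, h3, h0, h1, hf]
          have hB : tag2sentStepB feature tag vocab acc k = acc := by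
            simp [tag2sentStepB, hget, h3, h1]
          rw [hA, hB, hcast]
          have hbk' : pvBack tag (k + 1) = pvBack tag k := by
            rw [hback, hgetD]
            simp [h0, h1, h3]
          refine ih (k + 1) _ flag st hrest' ?_
          rcases hinv with ⟨hf, s, hst, hbk, hs0⟩ | ⟨hf, hnone⟩
          · exact Or.inl ⟨hf, s, hst, hbk' ▸ hbk, hs0⟩
          · exact Or.inr ⟨hf, fun s hs => hnone s (hbk' ▸ hs)⟩

-- ===== VERDICT (by name: the statement is the Claim_ definition above) =====
theorem tag2sent_spec : Claim_equal_tag2sent := by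
  intro feature tag length vocab _ _
  unfold Spec_tag2sent tag2sent tag2sent_alt
  rw [List.range_eq_range']
  have := tag2sent_loop feature vocab tag tag 0 [] 0 0 (by simp)
    (Or.inr ⟨by norm_num, fun s hs => by simp [pvBack] at hs⟩)
  simpa using this
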